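-- pv_equiv track=rewrite | github.com/RacleRay/Bank_FAQ_ChatBot | pattern/Optional_pattern_match_chatbot.py | place_holder_split
-- ===== SOURCE A (Python) =====
-- def place_holder_split(pattern):
--     "处理symbol划分问题"
--     pre = '@'
--     line = ''
--     count = 0
--     for s in pattern:
--         if ord('A') <= ord(pre) <= ord('z') and ord('A') <= ord(s) <= ord('z'):
--             line += s
--         elif (pre == '?' and (s == '*' or s in 'xyz')) or (pre == '*' and s in 'xyz'):
--             line += s
--             if s in 'xyz':
--                 count += 1
--         else:
--             line += ' ' + s
--         pre = s
--     return line.split(), count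
-- ===== SOURCE B (Python) =====
-- def _joins(p, c):
--     return (ord('A') <= ord(p) <= ord('z') and ord('A') <= ord(c) <= ord('z')) \
--         or (p == '?' and (c == '*' or c in 'xyz')) or (p == '*' and c in 'xyz')
--
--
-- def place_holder_split(pattern):
--     # build the token list directly, back to front, instead of joining a
--     # space-separated string and calling split()
--     toks = []
--     nxt = None
--     for c in reversed(pattern):
--         if nxt is not None and _joins(c, nxt):
--             toks[0] = c + toks[0]
--         else:
--             toks.insert(0, c)
--         nxt = c
--     tokens = [t for t in toks if not t.isspace()]
--     count = sum(1 for p, s in zip(pattern, pattern[1:]) if s in 'xyz' and p in '?*')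
--     return tokens, count
-- ===== Notes on version B (the rewrite author's own statement) =====
-- stated objective: alternative
-- what changed: B builds the token list directly with a back-to-front loop over the characters (prepending to or starting the front token) instead of concatenating a space-separated string and calling split(), filters whitespace tokens explicitly, and counts ?/* placeholders in a separate zip(pattern, pattern[1:]) pass instead of inside the tokenizing loop.
import Mathlib
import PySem

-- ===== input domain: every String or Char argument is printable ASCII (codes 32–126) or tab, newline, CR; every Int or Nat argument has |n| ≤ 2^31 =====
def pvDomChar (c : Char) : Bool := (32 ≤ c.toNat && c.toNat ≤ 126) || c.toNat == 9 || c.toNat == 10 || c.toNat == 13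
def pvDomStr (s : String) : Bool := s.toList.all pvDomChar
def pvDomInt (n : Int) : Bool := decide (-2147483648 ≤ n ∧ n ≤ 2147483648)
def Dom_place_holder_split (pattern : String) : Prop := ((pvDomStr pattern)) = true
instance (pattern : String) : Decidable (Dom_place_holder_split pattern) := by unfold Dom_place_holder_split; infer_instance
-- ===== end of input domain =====

-- B builds the token list directly with a back-to-front loop instead of joining a
-- space-separated string and calling split(), and counts placeholders in a separate zip pass.


-- ===== PORT A =====
-- Python str values are modelled as List Char (the exact PySem.Chars model);
-- the loop state (pre, line, count) is folded over the pattern's characters.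
def phsStepA (st : Char × List Char × Int) (s : Char) : Char × List Char × Int :=
  let pre := st.1
  let line := st.2.1
  let count := st.2.2
  if ('A'.toNat ≤ pre.toNat ∧ pre.toNat ≤ 'z'.toNat) ∧ ('A'.toNat ≤ s.toNat ∧ s.toNat ≤ 'z'.toNat) then
    (s, line ++ [s], count)
  else if (pre = '?' ∧ (s = '*' ∨ (s = 'x' ∨ s = 'y' ∨ s = 'z'))) ∨ (pre = '*' ∧ (s = 'x' ∨ s = 'y' ∨ s = 'z')) then
    (s, line ++ [s], if s = 'x' ∨ s = 'y' ∨ s = 'z' then count + 1 else count)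
  else
    (s, line ++ [' ', s], count)

def place_holder_split (pattern : String) : List String × Int :=
  let st := pattern.toList.foldl phsStepA ('@', [], 0)
  ((PySem.Chars.split₀ st.2.1).map String.ofList, st.2.2)

-- ===== PORT B =====
def phsJoins (p c : Char) : Bool :=
  (decide ('A'.toNat ≤ p.toNat) && decide (p.toNat ≤ 'z'.toNat)
    && decide ('A'.toNat ≤ c.toNat) && decide (c.toNat ≤ 'z'.toNat))
  || (p == '?' && (c == '*' || c == 'x' || c == 'y' || c == 'z'))
  || (p == '*' && (c == 'x' || c == 'y' || c == 'z'))

-- one step of B's backwards loop; nxt = the character processed just before (to the right);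
-- toks[0] is modelled by headD [] (toks is never empty when nxt is some)
def phsStepB (st : List (List Char) × Option Char) (c : Char) : List (List Char) × Option Char :=
  match st.2 with
  | some d => if phsJoins c d then ((c :: st.1.headD []) :: st.1.tail, some c)
              else ([c] :: st.1, some c)
  | none => ([c] :: st.1, some c)

def place_holder_split_alt (pattern : String) : List String × Int :=
  let st := pattern.toList.reverse.foldl phsStepB ([], none)
  let tokens := st.1.filter (fun t => !PySem.Chars.strIsspace t)
  let count : Int :=
    ((pattern.toList.zip (PySem.List.slice pattern.toList (some 1) none)).filter
      (fun ps => (ps.2 = 'x' ∨ ps.2 = 'y' ∨ ps.2 = 'z') ∧ (ps.1 = '?' ∨ ps.1 = '*'))).length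
  (tokens.map String.ofList, count)

-- ===== PRECONDITION & SPEC =====
def Spec_place_holder_split (pattern : String) (out : List String × Int) : Prop := out = place_holder_split_alt pattern
instance (pattern : String) (out : List String × Int) : Decidable (Spec_place_holder_split pattern out) := by unfold Spec_place_holder_split; infer_instance

-- ===== CLAIM (what is proved, stated in full; the proofs are below) =====
def Claim_equal_place_holder_split : Prop := ∀ (pattern : String), Dom_place_holder_split pattern → Spec_place_holder_split pattern (place_holder_split pattern)

-- ===== LEMMAS AND PROOFS =====

-- the line A accumulates, starting from previous character p
def phsLineOf (p : Char) : List Char → List Char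
  | [] => []
  | c :: cs => (if phsJoins p c then [c] else [' ', c]) ++ phsLineOf c cs

-- the count A accumulates (A's exact branch structure)
def phsCountOf (p : Char) : List Char → Int
  | [] => 0
  | c :: cs =>
      (if ('A'.toNat ≤ p.toNat ∧ p.toNat ≤ 'z'.toNat) ∧ ('A'.toNat ≤ c.toNat ∧ c.toNat ≤ 'z'.toNat) then 0
       else if (p = '?' ∧ (c = '*' ∨ (c = 'x' ∨ c = 'y' ∨ c = 'z'))) ∨ (p = '*' ∧ (c = 'x' ∨ c = 'y' ∨ c = 'z')) then
         (if c = 'x' ∨ c = 'y' ∨ c = 'z' then 1 else 0)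
       else (0 : Int)) + phsCountOf c cs

-- canonical tokenizer (what B's backwards fold computes)
def phsT : List Char → List (List Char)
  | [] => []
  | [c] => [[c]]
  | c :: d :: ds => if phsJoins c d then (c :: (phsT (d :: ds)).headD []) :: (phsT (d :: ds)).tail
                    else [c] :: phsT (d :: ds)

-- extension of the run started by c, and the remainder after it
def phsExt (c : Char) : List Char → List Char
  | [] => []
  | d :: ds => if phsJoins c d then d :: phsExt d ds else []

def phsRem (c : Char) : List Char → List Char
  | [] => []
  | d :: ds => if phsJoins c d then phsRem d ds else d :: ds

-- filtered tokenization (what both sides compute)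
def phsS (cs : List Char) : List (List Char) :=
  (phsT cs).filter (fun t => !PySem.Chars.strIsspace t)

-- the line of a fresh run: first character not preceded by an inserted space
def phsLineRun : List Char → List Char
  | [] => []
  | c :: cs => c :: phsLineOf c cs

theorem phsJoins_iff (p c : Char) :
    phsJoins p c = true ↔
      (('A'.toNat ≤ p.toNat ∧ p.toNat ≤ 'z'.toNat) ∧ ('A'.toNat ≤ c.toNat ∧ c.toNat ≤ 'z'.toNat))
      ∨ ((p = '?' ∧ (c = '*' ∨ (c = 'x' ∨ c = 'y' ∨ c = 'z'))) ∨ (p = '*' ∧ (c = 'x' ∨ c = 'y' ∨ c = 'z'))) := by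
  simp [phsJoins, Bool.or_eq_true, Bool.and_eq_true, decide_eq_true_eq, beq_iff_eq]
  tauto

theorem phsJoins_not_space_right (p c : Char) (h : phsJoins p c = true) :
    PySem.Chars.isspace c = false := by
  rcases (phsJoins_iff p c).mp h with h' | h'
  · have hA : 'A'.toNat = 65 := by decide
    have hz : 'z'.toNat = 122 := by decide
    rw [hA, hz] at h'
    simp [PySem.Chars.isspace]; omega
  · have hc : c = '*' ∨ c = 'x' ∨ c = 'y' ∨ c = 'z' := by tauto
    rcases hc with hc | hc | hc | hc <;> subst hc <;> decide

theorem phsJoins_not_space_left (p c : Char) (h : phsJoins p c = true) :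
    PySem.Chars.isspace p = false := by
  rcases (phsJoins_iff p c).mp h with h' | h'
  · have hA : 'A'.toNat = 65 := by decide
    have hz : 'z'.toNat = 122 := by decide
    rw [hA, hz] at h'
    simp [PySem.Chars.isspace]; omega
  · rcases h' with ⟨h1, _⟩ | ⟨h1, _⟩ <;> subst h1 <;> decide

theorem phsJoins_at (c : Char) : phsJoins '@' c = false := by
  have h2 : ('@' == '?') = false := by decide
  have h3 : ('@' == '*') = false := by decide
  simp [phsJoins, h2, h3]

theorem strIsspace_cons_false (c : Char) (l : List Char) (h : PySem.Chars.isspace c = false) :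
    PySem.Chars.strIsspace (c :: l) = false := by
  simp [PySem.Chars.strIsspace, h]

theorem phs_foldA (cs : List Char) : ∀ (p : Char) (line : List Char) (cnt : Int),
    cs.foldl phsStepA (p, line, cnt) =
      (cs.getLastD p, line ++ phsLineOf p cs, cnt + phsCountOf p cs) := by
  induction cs with
  | nil => intro p line cnt; simp [phsLineOf, phsCountOf]
  | cons c cs ih =>
    intro p line cnt
    show cs.foldl phsStepA (phsStepA (p, line, cnt) c) = _
    rw [List.getLastD_cons]
    by_cases h1 : ('A'.toNat ≤ p.toNat ∧ p.toNat ≤ 'z'.toNat) ∧ ('A'.toNat ≤ c.toNat ∧ c.toNat ≤ 'z'.toNat)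
    · have hj : phsJoins p c = true := (phsJoins_iff p c).mpr (Or.inl h1)
      simp only [phsStepA, if_pos h1, ih, phsLineOf, phsCountOf, hj, if_true]
      simp
    · by_cases h2 : (p = '?' ∧ (c = '*' ∨ (c = 'x' ∨ c = 'y' ∨ c = 'z'))) ∨ (p = '*' ∧ (c = 'x' ∨ c = 'y' ∨ c = 'z'))
      · have hj : phsJoins p c = true := (phsJoins_iff p c).mpr (Or.inr h2)
        simp only [phsStepA, if_neg h1, if_pos h2, ih, phsLineOf, phsCountOf, hj, if_true]
        by_cases hx : c = 'x' ∨ c = 'y' ∨ c = 'z' <;> simp [hx, add_assoc]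
      · have hj : phsJoins p c = false := by
          rcases h : phsJoins p c with _ | _
          · rfl
          · exact absurd ((phsJoins_iff p c).mp h) (by tauto)
        simp only [phsStepA, if_neg h1, if_neg h2, ih, phsLineOf, phsCountOf, hj, if_false,
          Bool.false_eq_true]
        simp

theorem phs_foldB (cs : List Char) :
    cs.reverse.foldl phsStepB ([], none) = (phsT cs, cs.head?) := by
  induction cs with
  | nil => rfl
  | cons c cs ih =>
    rw [List.reverse_cons, List.foldl_append, ih]
    cases cs with
    | nil => rfl
    | cons d ds =>
      show phsStepB (phsT (d :: ds), some d) c = _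
      simp only [phsStepB, phsT, List.head?]
      by_cases h : phsJoins c d <;> simp [h]

theorem phsT_run (cs : List Char) : ∀ c : Char,
    phsT (c :: cs) = (c :: phsExt c cs) :: phsT (phsRem c cs) := by
  induction cs with
  | nil => intro c; simp [phsT, phsExt, phsRem]
  | cons d ds ih =>
    intro c
    by_cases h : phsJoins c d
    · simp only [phsT, phsExt, phsRem, if_pos h, ih d]
      simp
    · simp [phsT, phsExt, phsRem, h]

theorem phs_go_main (cs : List Char) :
    (∀ acc, PySem.Chars.split₀.go (phsLineRun cs) [] acc = acc.reverse ++ phsS cs) ∧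
    (∀ (c : Char) (cur : List Char) (acc : List (List Char)), PySem.Chars.isspace c = false →
      PySem.Chars.split₀.go (phsLineOf c cs) (c :: cur) acc
        = acc.reverse ++ ((c :: cur).reverse ++ phsExt c cs) :: phsS (phsRem c cs)) := by
  induction cs with
  | nil =>
    constructor
    · intro acc; simp [phsLineRun, phsS, phsT, PySem.Chars.split₀.go]
    · intro c cur acc _
      simp [phsLineOf, phsExt, phsRem, phsS, phsT, PySem.Chars.split₀.go]
  | cons d ds ih =>
    have htop : ∀ acc, PySem.Chars.split₀.go (phsLineRun (d :: ds)) [] acc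
        = acc.reverse ++ phsS (d :: ds) := by
      intro acc
      show PySem.Chars.split₀.go (d :: phsLineOf d ds) [] acc = _
      by_cases hsp : PySem.Chars.isspace d = true
      · rw [PySem.Chars.split₀.go]
        simp only [hsp, if_true, List.isEmpty_nil, if_true]
        cases ds with
        | nil =>
          simp [phsLineOf, PySem.Chars.split₀.go, phsS, phsT, PySem.Chars.strIsspace, hsp]
        | cons e es =>
          have hj : phsJoins d e = false := by
            rcases h : phsJoins d e with _ | _
            · rfl
            · rw [phsJoins_not_space_left d e h] at hsp; exact absurd hsp (by simp)
          show PySem.Chars.split₀.go (phsLineOf d (e :: es)) [] acc = _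
          rw [phsLineOf]
          simp only [hj, if_false, Bool.false_eq_true]
          show PySem.Chars.split₀.go (' ' :: phsLineRun (e :: es)) [] acc = _
          rw [PySem.Chars.split₀.go]
          simp only [show PySem.Chars.isspace ' ' = true by decide, if_true, List.isEmpty_nil]
          rw [(ih.1) acc]
          simp only [phsS, phsT, hj, if_false, Bool.false_eq_true, List.filter_cons]
          simp [PySem.Chars.strIsspace, hsp]
      · have hsp' : PySem.Chars.isspace d = false := by simpa using hsp
        rw [PySem.Chars.split₀.go]
        simp only [hsp', Bool.false_eq_true, if_false]
        rw [(ih.2) d [] acc hsp']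
        simp [phsS, phsT_run ds d, strIsspace_cons_false d _ hsp']
    refine ⟨htop, ?_⟩
    intro c cur acc hc
    rw [phsLineOf]
    by_cases hj : phsJoins c d
    · have hd : PySem.Chars.isspace d = false := phsJoins_not_space_right c d hj
      simp only [hj, if_true, List.cons_append, List.nil_append]
      rw [PySem.Chars.split₀.go]
      simp only [hd, Bool.false_eq_true, if_false]
      rw [(ih.2) d (c :: cur) acc hd]
      simp only [phsExt, phsRem, hj, if_true]
      simp
    · simp only [hj, if_false, Bool.false_eq_true, List.cons_append, List.nil_append]
      rw [PySem.Chars.split₀.go]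
      simp only [show PySem.Chars.isspace ' ' = true by decide, if_true,
        List.isEmpty_cons, Bool.false_eq_true, if_false]
      have h' := htop ((c :: cur).reverse :: acc)
      simp only [phsLineRun] at h'
      rw [h']
      simp only [phsExt, phsRem, hj, if_false, Bool.false_eq_true]
      simp

theorem phs_line (cs : List Char) :
    PySem.Chars.split₀ (phsLineOf '@' cs) = phsS cs := by
  cases cs with
  | nil => simp [phsLineOf, phsS, phsT, PySem.Chars.split₀, PySem.Chars.split₀.go]
  | cons c cs =>
    show PySem.Chars.split₀.go (phsLineOf '@' (c :: cs)) [] [] = _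
    rw [phsLineOf]
    simp only [phsJoins_at, if_false, Bool.false_eq_true, List.cons_append, List.nil_append]
    rw [PySem.Chars.split₀.go]
    simp only [show PySem.Chars.isspace ' ' = true by decide, if_true, List.isEmpty_nil]
    have := (phs_go_main (c :: cs)).1 []
    simpa [phsLineRun] using this

theorem phs_inc (p c : Char) :
    (if ('A'.toNat ≤ p.toNat ∧ p.toNat ≤ 'z'.toNat) ∧ ('A'.toNat ≤ c.toNat ∧ c.toNat ≤ 'z'.toNat) then (0 : Int)
     else if (p = '?' ∧ (c = '*' ∨ (c = 'x' ∨ c = 'y' ∨ c = 'z'))) ∨ (p = '*' ∧ (c = 'x' ∨ c = 'y' ∨ c = 'z')) then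
       (if c = 'x' ∨ c = 'y' ∨ c = 'z' then 1 else 0)
     else (0 : Int))
    = if (c = 'x' ∨ c = 'y' ∨ c = 'z') ∧ (p = '?' ∨ p = '*') then 1 else 0 := by
  by_cases hx : c = 'x' ∨ c = 'y' ∨ c = 'z'
  · by_cases hp : p = '?' ∨ p = '*'
    · have h1 : ¬ (('A'.toNat ≤ p.toNat ∧ p.toNat ≤ 'z'.toNat) ∧ ('A'.toNat ≤ c.toNat ∧ c.toNat ≤ 'z'.toNat)) := by
        rcases hp with hp | hp <;> subst hp <;> exact fun h => absurd h.1.1 (by decide)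
      have h2 : (p = '?' ∧ (c = '*' ∨ (c = 'x' ∨ c = 'y' ∨ c = 'z'))) ∨ (p = '*' ∧ (c = 'x' ∨ c = 'y' ∨ c = 'z')) := by
        rcases hp with hp | hp
        · exact Or.inl ⟨hp, Or.inr hx⟩
        · exact Or.inr ⟨hp, hx⟩
      rw [if_neg h1, if_pos h2, if_pos hx, if_pos ⟨hx, hp⟩]
    · have hB : ¬ ((p = '?' ∧ (c = '*' ∨ (c = 'x' ∨ c = 'y' ∨ c = 'z'))) ∨ (p = '*' ∧ (c = 'x' ∨ c = 'y' ∨ c = 'z'))) :=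
        fun h => hp (h.elim (fun h' => Or.inl h'.1) (fun h' => Or.inr h'.1))
      rw [if_neg (fun h : (c = 'x' ∨ c = 'y' ∨ c = 'z') ∧ (p = '?' ∨ p = '*') => hp h.2)]
      by_cases h1 : ('A'.toNat ≤ p.toNat ∧ p.toNat ≤ 'z'.toNat) ∧ ('A'.toNat ≤ c.toNat ∧ c.toNat ≤ 'z'.toNat)
      · rw [if_pos h1]
      · rw [if_neg h1, if_neg hB]
  · rw [if_neg (fun h : (c = 'x' ∨ c = 'y' ∨ c = 'z') ∧ (p = '?' ∨ p = '*') => hx h.1)]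
    by_cases h1 : ('A'.toNat ≤ p.toNat ∧ p.toNat ≤ 'z'.toNat) ∧ ('A'.toNat ≤ c.toNat ∧ c.toNat ≤ 'z'.toNat)
    · rw [if_pos h1]
    · rw [if_neg h1]
      by_cases h2 : (p = '?' ∧ (c = '*' ∨ (c = 'x' ∨ c = 'y' ∨ c = 'z'))) ∨ (p = '*' ∧ (c = 'x' ∨ c = 'y' ∨ c = 'z'))
      · rw [if_pos h2, if_neg hx]
      · rw [if_neg h2]

theorem phs_count (cs : List Char) : ∀ p : Char,
    phsCountOf p cs =
      (((p :: cs).zip ((p :: cs).tail)).filter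
        (fun ps => (ps.2 = 'x' ∨ ps.2 = 'y' ∨ ps.2 = 'z') ∧ (ps.1 = '?' ∨ ps.1 = '*'))).length := by
  induction cs with
  | nil => intro p; simp [phsCountOf]
  | cons c cs ih =>
    intro p
    rw [phsCountOf, phs_inc, ih c]
    by_cases h : (c = 'x' ∨ c = 'y' ∨ c = 'z') ∧ (p = '?' ∨ p = '*')
    · rw [if_pos h]
      simp only [List.tail_cons, List.zip_cons_cons, List.filter_cons]
      rw [if_pos (by simpa using h)]
      simp only [List.length_cons]
      push_cast
      ring
    · rw [if_neg h]
      simp only [List.tail_cons, List.zip_cons_cons, List.filter_cons]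
      rw [if_neg (by simpa using h)]
      simp

theorem phs_eq (pattern : String) : place_holder_split pattern = place_holder_split_alt pattern := by
  rw [place_holder_split, place_holder_split_alt]
  rw [phs_foldA, phs_foldB, PySem.List.slice_from_one]
  refine Prod.ext ?_ ?_
  · show (PySem.Chars.split₀ (phsLineOf '@' pattern.toList)).map String.ofList = _
    rw [phs_line]
    rfl
  · show (0 : Int) + phsCountOf '@' pattern.toList = _
    rw [zero_add]
    cases h : pattern.toList with
    | nil => simp [phsCountOf]
    | cons c cs =>
      rw [phsCountOf, phs_inc, phs_count cs c]
      have h1 : ¬ ((c = 'x' ∨ c = 'y' ∨ c = 'z') ∧ ('@' = '?' ∨ '@' = '*')) := by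
        intro hh; rcases hh.2 with hh | hh <;> exact absurd hh (by decide)
      rw [if_neg h1, zero_add]

-- ===== VERDICT (by name: the statement is the Claim_ definition above) =====
theorem place_holder_split_spec : Claim_equal_place_holder_split := by
  intro pattern _
  show place_holder_split pattern = place_holder_split_alt pattern
  exact phs_eq pattern
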